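-- pv_equiv track=rewrite | github.com/b-hakim/extended_vehicle_percecption | paper3_scripts/GameTheory.py | mask_to_array
-- ===== SOURCE A (Python) =====
-- def mask_to_array(mask: int, num_bits: int) -> list:
--     ret = []
--
--     while mask != 0:
--         ret.append(mask&1)
--         mask = mask >> 1
--
--     while len(ret) < num_bits:
--         ret.append(0)
--
--     ret.reverse()
--
--     return ret
-- ===== SOURCE B (Python) =====
-- def mask_to_array(mask: int, num_bits: int) -> list:
--     n = max(mask.bit_length(), num_bits)
--     return [(mask >> (n - 1 - i)) & 1 for i in range(n)]
-- ===== Notes on version B (the rewrite author's own statement) =====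
-- stated objective: simpler
-- what changed: B computes the output length n = max(mask.bit_length(), num_bits) up front and emits the bits MSB-first by direct big-endian indexing (mask >> (n-1-i)) & 1 in one comprehension, replacing A's collect-LSB-first loop, separate zero-padding loop and final reversal; Pre_ excludes mask < 0, on which A's while-loop never terminates.
import Mathlib
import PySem

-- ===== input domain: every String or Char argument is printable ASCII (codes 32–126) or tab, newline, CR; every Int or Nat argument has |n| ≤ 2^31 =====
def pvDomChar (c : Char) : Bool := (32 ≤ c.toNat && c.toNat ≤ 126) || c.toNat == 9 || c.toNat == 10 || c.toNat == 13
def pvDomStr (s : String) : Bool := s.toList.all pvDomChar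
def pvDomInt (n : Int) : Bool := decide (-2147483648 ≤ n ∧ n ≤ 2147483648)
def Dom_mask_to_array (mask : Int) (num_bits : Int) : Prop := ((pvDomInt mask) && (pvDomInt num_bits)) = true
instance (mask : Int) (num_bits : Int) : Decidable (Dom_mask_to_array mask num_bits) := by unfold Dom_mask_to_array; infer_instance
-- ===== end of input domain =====

-- B builds the bit array MSB-first by direct indexing (length computed up front) instead of
-- A's collect-LSB-first / pad / reverse; equal on all mask ≥ 0 (A's loop diverges for mask < 0).


-- ===== PORT A =====
-- `while mask != 0: ret.append(mask&1); mask = mask >> 1`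
-- mask & 1 = mask % 2 (floor mod) and mask >> 1 = mask // 2 (floor div): exact for every Python int.
-- The Nat argument is only fuel making the loop total (it never alters the computed value:
-- mask.toNat bounds the number of iterations for mask ≥ 0, and for mask < 0 the Python loop
-- never terminates; those inputs are outside Pre_).
def mtaLoop1 (fuel : Nat) (mask : Int) (ret : List Int) : List Int :=
  match fuel with
  | 0 => ret
  | fuel + 1 =>
    if 0 < mask then
      mtaLoop1 fuel (PySem.Int.floordiv mask 2) (ret ++ [PySem.Int.mod mask 2])
    else ret

-- `while len(ret) < num_bits: ret.append(0)`  (fuel = the number of iterations left)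
def mtaLoop2 (fuel : Nat) (ret : List Int) (num_bits : Int) : List Int :=
  match fuel with
  | 0 => ret
  | fuel + 1 =>
    if (ret.length : Int) < num_bits then mtaLoop2 fuel (ret ++ [0]) num_bits else ret

def mask_to_array (mask : Int) (num_bits : Int) : List Int :=
  let ret := mtaLoop1 mask.toNat mask []
  (mtaLoop2 (num_bits - ret.length).toNat ret num_bits).reverse

-- ===== PORT B =====
-- `[(mask >> (n - 1 - i)) & 1 for i in range(n)]` with n = max(mask.bit_length(), num_bits);
-- mask >> k = mask // 2**k (floor div) and & 1 = % 2 (floor mod): exact for every Python int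
-- (the shift amount n-1-i is ≥ 0 for i in range(n)).
def mask_to_array_alt (mask : Int) (num_bits : Int) : List Int :=
  let n : Int := max ((PySem.Int.bitLength mask : Nat) : Int) num_bits
  (PySem.List.pyRange 0 n 1).map
    (fun i => PySem.Int.mod (PySem.Int.floordiv mask (2 ^ (n - 1 - i).toNat)) 2)

-- ===== PRECONDITION & SPEC =====
-- Pre_ excludes mask < 0: there A's first while-loop never terminates (mask >> 1 fixes -1),
-- so A returns no value on those inputs.
def Pre_mask_to_array (mask : Int) (num_bits : Int) : Prop := 0 ≤ mask
instance (mask : Int) (num_bits : Int) : Decidable (Pre_mask_to_array mask num_bits) := by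
  unfold Pre_mask_to_array; infer_instance
def pvWitness_mask_to_array : Int × Int := (37, 8)

def Spec_mask_to_array (mask : Int) (num_bits : Int) (out : List Int) : Prop := out = mask_to_array_alt mask num_bits
instance (mask : Int) (num_bits : Int) (out : List Int) : Decidable (Spec_mask_to_array mask num_bits out) := by unfold Spec_mask_to_array; infer_instance

-- ===== CLAIM (what is proved, stated in full; the proofs are below) =====
def Claim_equal_mask_to_array : Prop := ∀ (mask : Int) (num_bits : Int), Dom_mask_to_array mask num_bits → Pre_mask_to_array mask num_bits → Spec_mask_to_array mask num_bits (mask_to_array mask num_bits)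

-- ===== LEMMAS AND PROOFS =====

-- the first loop collects the bits LSB-first: bit j is (mask // 2^j) % 2
theorem mtaLoop1_eq (fuel : Nat) (mask : Int) (ret : List Int) (hm : 0 ≤ mask)
    (hfuel : PySem.Int.bitLength mask ≤ fuel) :
    mtaLoop1 fuel mask ret = ret ++ (List.range (PySem.Int.bitLength mask)).map
      (fun j => PySem.Int.mod (PySem.Int.floordiv mask (2 ^ j)) 2) := by
  induction fuel generalizing mask ret with
  | zero =>
    have h0 : mask = 0 := by
      by_contra hne
      have := PySem.Int.bitLength_of_pos (by omega : 0 < mask)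
      omega
    subst h0
    simp [mtaLoop1, PySem.Int.bitLength_zero]
  | succ fuel ih =>
    by_cases h : 0 < mask
    · have hhalf : (0:Int) ≤ PySem.Int.floordiv mask 2 := by
        rw [PySem.Int.floordiv_eq_ediv_of_pos (by omega : (0:Int) < 2)]; omega
      have hbl := PySem.Int.bitLength_of_pos h
      have hstep : (fun j => PySem.Int.mod (PySem.Int.floordiv mask (2 ^ (j+1))) 2)
          = fun j => PySem.Int.mod (PySem.Int.floordiv (PySem.Int.floordiv mask 2) (2 ^ j)) 2 := by
        funext j
        rw [PySem.Int.floordiv_eq_ediv_of_pos (by positivity),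
          PySem.Int.floordiv_eq_ediv_of_pos (by positivity),
          PySem.Int.floordiv_eq_ediv_of_pos (by omega : (0:Int) < 2),
          Int.ediv_ediv_of_nonneg (by omega)]
        norm_num [pow_succ, mul_comm]
      have hzero : PySem.Int.mod (PySem.Int.floordiv mask (2 ^ 0)) 2 = PySem.Int.mod mask 2 := by
        rw [pow_zero, PySem.Int.floordiv_eq_ediv_of_pos (by omega : (0:Int) < 1), Int.ediv_one]
      rw [mtaLoop1, if_pos h, ih _ _ hhalf (by omega), hbl,
        List.range_succ_eq_map, List.map_cons, List.map_map]
      have hcomp : ((fun j => PySem.Int.mod (PySem.Int.floordiv mask (2 ^ j)) 2) ∘ Nat.succ)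
          = fun j => PySem.Int.mod (PySem.Int.floordiv (PySem.Int.floordiv mask 2) (2 ^ j)) 2 := by
        rw [← hstep]; funext j; rfl
      rw [hcomp, hzero]
      simp
    · have h0 : mask = 0 := by omega
      subst h0
      simp [mtaLoop1, PySem.Int.bitLength_zero]

-- enough fuel: the first loop runs bitLength-many iterations, and bitLength mask ≤ mask.toNat
theorem bitLength_le_toNat (mask : Int) (hm : 0 ≤ mask) :
    PySem.Int.bitLength mask ≤ mask.toNat := by
  rcases eq_or_lt_of_le hm with h0 | hpos
  · rw [← h0, PySem.Int.bitLength_zero]; omega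
  · have h1 := PySem.Int.two_pow_bitLength_le mask (by omega)
    have h2 : PySem.Int.bitLength mask - 1 < 2 ^ (PySem.Int.bitLength mask - 1) :=
      Nat.lt_two_pow_self
    have h3 : 1 ≤ PySem.Int.bitLength mask := by
      by_contra hc
      have : PySem.Int.bitLength mask = 0 := by omega
      have hlt := PySem.Int.lt_two_pow_bitLength mask
      rw [this] at hlt
      omega
    omega

-- the second loop pads with its fuel's worth of zeros when fuel = (num_bits - len).toNat
theorem mtaLoop2_eq (fuel : Nat) (ret : List Int) (num_bits : Int)
    (hf : fuel = (num_bits - ret.length).toNat) :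
    mtaLoop2 fuel ret num_bits = ret ++ List.replicate fuel 0 := by
  induction fuel generalizing ret with
  | zero => simp [mtaLoop2]
  | succ fuel ih =>
    have hlt : (ret.length : Int) < num_bits := by omega
    rw [mtaLoop2, if_pos hlt, ih (ret ++ [0]) (by simp; omega)]
    simp [List.replicate_succ]

-- floor-div by a power of two past the bit length gives 0
theorem floordiv_pow_eq_zero (mask : Int) (hm : 0 ≤ mask) (e : Nat)
    (he : PySem.Int.bitLength mask ≤ e) :
    PySem.Int.floordiv mask (2 ^ e) = 0 := by
  rw [PySem.Int.floordiv_eq_ediv_of_pos (by positivity)]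
  apply Int.ediv_eq_zero_of_lt hm
  have h1 : mask.natAbs < 2 ^ PySem.Int.bitLength mask := PySem.Int.lt_two_pow_bitLength mask
  have h2 : (2:Nat) ^ PySem.Int.bitLength mask ≤ 2 ^ e := Nat.pow_le_pow_right (by omega) he
  have h3 : mask = (mask.natAbs : Int) := by omega
  rw [h3]
  exact_mod_cast Nat.lt_of_lt_of_le h1 h2

theorem mask_to_array_spec : Claim_equal_mask_to_array := by
  intro mask num_bits _ hpre
  unfold Spec_mask_to_array mask_to_array mask_to_array_alt
  dsimp only
  have hm : (0:Int) ≤ mask := hpre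
  rw [mtaLoop1_eq mask.toNat mask [] hm (bitLength_le_toNat mask hm), List.nil_append,
    mtaLoop2_eq _ _ _ rfl, PySem.List.pyRange_one, List.map_map]
  set L := PySem.Int.bitLength mask with hL
  set n : Int := max ((L : Nat) : Int) num_bits with hn
  have hn0 : 0 ≤ n := le_max_of_le_left (by positivity)
  set N : Nat := n.toNat with hN
  have hnN : n = (N : Int) := by omega
  have hLN : L ≤ N := by
    have h := le_max_left ((L : Nat) : Int) num_bits
    omega
  have hKlen : (num_bits - ((List.range L).map
      (fun j => PySem.Int.mod (PySem.Int.floordiv mask (2 ^ j)) 2)).length).toNat = N - L := by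
    simp only [List.length_map, List.length_range]
    rcases le_total num_bits ((L:Nat):Int) with hc | hc
    · have he : n = ((L:Nat):Int) := max_eq_left hc
      omega
    · have he : n = num_bits := max_eq_right hc
      omega
  rw [hKlen]
  apply List.ext_getElem
  · simp only [List.length_reverse, List.length_append, List.length_replicate,
      List.length_map, List.length_range]
    omega
  · intro i h1 h2
    simp only [List.length_map, List.length_range] at h2
    have hiN : i < N := by simpa [hnN] using h2
    have hexp : ((n - 1 - (0 + (i:Int))).toNat) = N - 1 - i := by omega
    simp only [List.getElem_map, List.getElem_range, Function.comp_apply, hexp]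
    rw [List.getElem_reverse]
    simp only [List.length_append, List.length_replicate, List.length_map, List.length_range]
    by_cases hi : L + i < N
    · -- padding region (reverse hits the replicate suffix last-first): bit index N-1-i ≥ L
      rw [List.getElem_append_right
        (by simp only [List.length_map, List.length_range]; omega)]
      simp only [List.length_map, List.length_range]
      rw [List.getElem_replicate]
      rw [floordiv_pow_eq_zero mask hm _ (by omega)]
      rw [PySem.Int.mod_eq_emod_of_pos (by omega)]
      simp
    · -- bit region
      rw [List.getElem_append_left
        (by simp only [List.length_map, List.length_range]; omega)]
      simp only [List.getElem_map, List.getElem_range]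
      have he : L + (N - L) - 1 - i = N - 1 - i := by omega
      rw [he]
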